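-- pv_equiv track=rewrite | github.com/lmrojas/video_creator | video_app/ai_services/text_generation.py | _extract_scenes
-- ===== SOURCE A (Python) =====
-- def _extract_scenes(script):
--     """Extrae las escenas del script generado."""
--     # Implementación básica - se puede mejorar con NLP
--     scenes = []
--     current_scene = ""
--
--     for line in script.split('\n'):
--         if line.strip().lower().startswith(('escena', 'scene')):
--             if current_scene:
--                 scenes.append(current_scene.strip())
--             current_scene = line
--         else:
--             current_scene += f"\n{line}"
--
--     if current_scene:
--         scenes.append(current_scene.strip())
--
--     return scenes
-- ===== SOURCE B (Python) =====
-- def _extract_scenes(script):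
--     """Extrae las escenas del script generado."""
--     lines = script.split('\n')
--     starts = [i for i, line in enumerate(lines)
--               if line.strip().lower().startswith(('escena', 'scene'))]
--     bounds = starts + [len(lines)]
--     segments = [(0, bounds[0])] if bounds[0] != 0 else []
--     segments += zip(starts, bounds[1:])
--     return ['\n'.join(lines[a:b]).strip() for a, b in segments]
-- ===== Notes on version B (the rewrite author's own statement) =====
-- stated objective: alternative
-- what changed: B discovers the header-line indices in one pass and builds each scene by joining a slice of the line list between consecutive boundaries, instead of A's stateful loop that accumulates a growing current-scene string and flushes it at each header.
import Mathlib
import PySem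

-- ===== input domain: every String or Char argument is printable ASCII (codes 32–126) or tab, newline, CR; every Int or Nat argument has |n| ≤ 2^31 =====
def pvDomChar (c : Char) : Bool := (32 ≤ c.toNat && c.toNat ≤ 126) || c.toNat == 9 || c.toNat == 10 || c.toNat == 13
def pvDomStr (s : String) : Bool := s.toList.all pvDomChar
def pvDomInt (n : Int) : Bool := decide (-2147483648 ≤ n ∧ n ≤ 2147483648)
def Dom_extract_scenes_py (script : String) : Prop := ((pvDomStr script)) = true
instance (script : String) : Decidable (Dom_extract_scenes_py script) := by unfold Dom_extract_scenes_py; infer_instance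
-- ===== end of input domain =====

-- B replaces A's running string accumulation by header-index discovery followed by slice-based
-- segment building (objective: alternative decomposition, same exact output).

-- ===== PORT A =====
-- line.strip().lower().startswith(('escena', 'scene'))  (the header test, shared verbatim by both Pythons)
def pvIsHeader (line : List Char) : Bool :=
  PySem.Chars.startswith (PySem.Chars.lower (PySem.Chars.strip line)) "escena".toList ||
  PySem.Chars.startswith (PySem.Chars.lower (PySem.Chars.strip line)) "scene".toList

-- the body of A's for-loop, state = (scenes, current_scene)
def pvStepA (st : List (List Char) × List Char) (line : List Char) : List (List Char) × List Char :=
  if pvIsHeader line then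
    if st.2 ≠ [] then (st.1 ++ [PySem.Chars.strip st.2], line) else (st.1, line)
  else (st.1, st.2 ++ '\n' :: line)

def extract_scenes_py (script : String) : List String :=
  let st := (PySem.Chars.splitOn script.toList ['\n']).foldl pvStepA ([], [])
  (if st.2 ≠ [] then st.1 ++ [PySem.Chars.strip st.2] else st.1).map String.ofList

-- ===== PORT B =====
def extract_scenes_py_alt (script : String) : List String :=
  let lines := PySem.Chars.splitOn script.toList ['\n']
  let starts := (PySem.List.enumerate lines).filterMap
      (fun p => if pvIsHeader p.2 then some p.1 else none)
  let bounds := starts ++ [(lines.length : Int)]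
  -- bounds is never empty, so Python's bounds[0] is ported as bounds.headD 0
  let segments := (if bounds.headD 0 ≠ 0 then [((0 : Int), bounds.headD 0)] else [])
      ++ starts.zip bounds.tail
  segments.map (fun ab =>
    String.ofList (PySem.Chars.strip (PySem.Chars.join ['\n']
      (PySem.List.slice lines (some ab.1) (some ab.2)))))

-- ===== PRECONDITION & SPEC =====
def Spec_extract_scenes_py (script : String) (out : List String) : Prop := out = extract_scenes_py_alt script
instance (script : String) (out : List String) : Decidable (Spec_extract_scenes_py script out) := by unfold Spec_extract_scenes_py; infer_instance

-- ===== CLAIM (what is proved, stated in full; the proofs are below) =====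
def Claim_equal_extract_scenes_py : Prop := ∀ (script : String), Dom_extract_scenes_py script → Spec_extract_scenes_py script (extract_scenes_py script)

-- ===== LEMMAS AND PROOFS =====

-- strip (join '\n' g) : the rendered scene of a group of lines g
def pvStripJoin (g : List (List Char)) : List Char :=
  PySem.Chars.strip (PySem.Chars.join ['\n'] g)

-- "\n" + l0 + "\n" + l1 + … : A's accumulation over a headerless group
def pvFlat (gs : List (List Char)) : List Char := (gs.map ('\n' :: ·)).flatten

-- A's loop as a structural recursion producing the remaining scenes
def pvRunA : List Char → List (List Char) → List (List Char)
  | cur, [] => if cur ≠ [] then [PySem.Chars.strip cur] else []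
  | cur, l :: ls =>
    if pvIsHeader l then
      (if cur ≠ [] then PySem.Chars.strip cur :: pvRunA l ls else pvRunA l ls)
    else pvRunA (cur ++ '\n' :: l) ls

-- grouping of the lines from the first header on: each group starts at a header
def pvChop : List (List Char) → List (List (List Char))
  | [] => []
  | h :: t => (h :: t.takeWhile (fun l => !pvIsHeader l)) :: pvChop (t.dropWhile (fun l => !pvIsHeader l))
termination_by l => l.length
decreasing_by
  simpa using Nat.lt_succ_of_le (t.length_dropWhile_le _)

-- Nat-valued header positions (proof-side mirror of B's enumerate/filterMap)
def pvStartsN : List (List Char) → List Nat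
  | [] => []
  | l :: ls => if pvIsHeader l then 0 :: (pvStartsN ls).map (· + 1) else (pvStartsN ls).map (· + 1)

theorem pvChop_nil : pvChop [] = [] := by rw [pvChop]

theorem pvChop_cons (h : List Char) (t : List (List Char)) :
    pvChop (h :: t) = (h :: t.takeWhile (fun l => !pvIsHeader l))
      :: pvChop (t.dropWhile (fun l => !pvIsHeader l)) := by rw [pvChop]

theorem pvHeader_ne_nil {l : List Char} (h : pvIsHeader l = true) : l ≠ [] := by
  intro he; subst he; exact absurd h (by decide)

theorem pvStrip_cons_nl (cs : List Char) :
    PySem.Chars.strip ('\n' :: cs) = PySem.Chars.strip cs := by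
  simp [PySem.Chars.strip, PySem.Chars.lstrip,
    (by decide : PySem.Chars.isspace '\n' = true)]

theorem pvJoin_eq_flat (a : List Char) (gs : List (List Char)) :
    PySem.Chars.join ['\n'] (a :: gs) = a ++ pvFlat gs := by
  induction gs generalizing a with
  | nil => simp [PySem.Chars.join_singleton, pvFlat]
  | cons g gs ih => simp [PySem.Chars.join_cons_cons, ih, pvFlat]

theorem pvTake_takeWhile (p : List Char → Bool) (ls : List (List Char)) :
    ls.take (ls.takeWhile p).length = ls.takeWhile p :=
  (List.prefix_iff_eq_take.mp (List.takeWhile_prefix p)).symm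

theorem pvFoldA_bridge (lines : List (List Char)) :
    ∀ scenes cur,
      (let st := lines.foldl pvStepA (scenes, cur)
       if st.2 ≠ [] then st.1 ++ [PySem.Chars.strip st.2] else st.1)
      = scenes ++ pvRunA cur lines := by
  induction lines with
  | nil => intro scenes cur; by_cases h : cur = [] <;> simp [pvRunA, h]
  | cons l ls ih =>
    intro scenes cur
    by_cases hH : pvIsHeader l <;> by_cases hc : cur = [] <;>
      simp [pvRunA, pvStepA, hH, hc, ih]

theorem pvRunA_spec (lines : List (List Char)) :
    ∀ cur, pvRunA cur lines =
      (if cur ++ pvFlat (lines.takeWhile (fun l => !pvIsHeader l)) = [] then []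
       else [PySem.Chars.strip (cur ++ pvFlat (lines.takeWhile (fun l => !pvIsHeader l)))])
      ++ (pvChop (lines.dropWhile (fun l => !pvIsHeader l))).map pvStripJoin := by
  induction lines with
  | nil => intro cur; by_cases h : cur = [] <;> simp [pvRunA, pvFlat, pvChop_nil, h]
  | cons l ls ih =>
    intro cur
    cases hH : pvIsHeader l
    · have h1 : (l :: ls).takeWhile (fun x => !pvIsHeader x)
          = l :: ls.takeWhile (fun x => !pvIsHeader x) := by
        simp [hH]
      have h2 : (l :: ls).dropWhile (fun x => !pvIsHeader x)
          = ls.dropWhile (fun x => !pvIsHeader x) := by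
        simp [hH]
      rw [h1, h2]
      have hstep : pvRunA cur (l :: ls) = pvRunA (cur ++ '\n' :: l) ls := by
        simp [pvRunA, hH]
      rw [hstep, ih (cur ++ '\n' :: l)]
      simp [pvFlat]
    · have hl := pvHeader_ne_nil hH
      have hrec : pvRunA l ls = pvStripJoin (l :: ls.takeWhile (fun x => !pvIsHeader x)) ::
          (pvChop (ls.dropWhile (fun x => !pvIsHeader x))).map pvStripJoin := by
        rw [ih l]
        have hne : l ++ pvFlat (ls.takeWhile (fun x => !pvIsHeader x)) ≠ [] := by
          intro he; exact hl (List.append_eq_nil_iff.mp he).1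
        simp [hne, pvStripJoin, pvJoin_eq_flat]
      by_cases hc : cur = [] <;>
        simp [pvRunA, hH, hc, pvChop_cons, hrec, pvFlat]

-- head of pvStartsN (default: length) = length of the headerless prefix
theorem pvStartsN_headD (ls : List (List Char)) :
    (pvStartsN ls).headD ls.length = (ls.takeWhile (fun l => !pvIsHeader l)).length := by
  induction ls with
  | nil => simp [pvStartsN]
  | cons l ls ih =>
    cases hH : pvIsHeader l
    · have hm : pvStartsN (l :: ls) = (pvStartsN ls).map (· + 1) := by
        simp [pvStartsN, hH]
      rw [hm, List.takeWhile_cons, if_pos (by simp [hH])]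
      simp only [List.length_cons, ← ih]
      cases pvStartsN ls <;> simp
    · simp [pvStartsN, hH]

-- slicing (l :: ls) at shifted index pairs = slicing ls at the original pairs
theorem pvShift (l : List Char) (ls : List (List Char)) (s : List Nat) :
    ((s.map (· + 1)).zip ((s.map (· + 1)).tail ++ [ls.length + 1])).map
        (fun ab => ((l :: ls).drop ab.1).take (ab.2 - ab.1))
      = (s.zip (s.tail ++ [ls.length])).map (fun ab => (ls.drop ab.1).take (ab.2 - ab.1)) := by
  have ht : (s.map (· + 1)).tail ++ [ls.length + 1] = (s.tail ++ [ls.length]).map (· + 1) := by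
    simp [List.map_tail]
  rw [ht, List.zip_map, List.map_map]
  refine List.map_congr_left (fun ab _ => ?_)
  simp [Prod.map, Nat.succ_sub_succ]

-- zip of a cons with the (always nonempty) bounds list
theorem pvZip_cons (m : List Nat) (x : Nat) :
    (0 :: m).zip (m ++ [x]) = (0, m.headD x) :: m.zip (m.tail ++ [x]) := by
  cases m <;> simp

-- the header segments, cut by Nat indices, are exactly the chop groups
theorem pvSegs_spec (ls : List (List Char)) :
    ((pvStartsN ls).zip ((pvStartsN ls).tail ++ [ls.length])).map
        (fun ab => (ls.drop ab.1).take (ab.2 - ab.1))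
      = pvChop (ls.dropWhile (fun l => !pvIsHeader l)) := by
  induction ls with
  | nil => simp [pvStartsN, pvChop_nil]
  | cons l ls ih =>
    cases hH : pvIsHeader l
    · have hm : pvStartsN (l :: ls) = (pvStartsN ls).map (· + 1) := by
        simp [pvStartsN, hH]
      have hd : (l :: ls).dropWhile (fun x => !pvIsHeader x)
          = ls.dropWhile (fun x => !pvIsHeader x) := by
        simp [hH]
      rw [hm, hd, List.length_cons, pvShift, ih]
    · have hm : pvStartsN (l :: ls) = 0 :: (pvStartsN ls).map (· + 1) := by
        simp [pvStartsN, hH]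
      have hd : (l :: ls).dropWhile (fun x => !pvIsHeader x) = l :: ls := by
        simp [hH]
      have hhd : ((pvStartsN ls).map (· + 1)).headD (ls.length + 1)
          = (pvStartsN ls).headD ls.length + 1 := by
        cases pvStartsN ls <;> simp
      rw [hm, hd, pvChop_cons, List.length_cons, List.tail_cons, pvZip_cons, List.map_cons,
        pvShift, ih]
      congr 1
      rw [hhd, pvStartsN_headD]
      simp [pvTake_takeWhile]

-- B's starts list = cast of pvStartsN
theorem pvStarts_cast (ls : List (List Char)) : ∀ s : Nat,
    (PySem.List.enumerate ls (s : Int)).filterMap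
        (fun p => if pvIsHeader p.2 then some p.1 else none)
      = (pvStartsN ls).map (fun k => ((s + k : Nat) : Int)) := by
  induction ls with
  | nil => intro s; simp [PySem.List.enumerate_nil, pvStartsN]
  | cons l ls ih =>
    intro s
    rw [PySem.List.enumerate_cons, List.filterMap_cons]
    have hc : ((s : Int) + 1) = ((s + 1 : Nat) : Int) := by push_cast; ring
    rw [hc, ih (s + 1)]
    cases hH : pvIsHeader l
    · rw [pvStartsN, hH]
      simp only [Bool.false_eq_true, if_false, List.map_map]
      exact List.map_congr_left (fun k _ => by simp; ring)
    · rw [pvStartsN, hH]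
      simp only [if_true, List.map_cons, List.map_map]
      refine congrArg₂ _ (by simp) ?_
      exact List.map_congr_left (fun k _ => by simp; ring)

-- ===== VERDICT (by name: the statement is the Claim_ definition above) =====
theorem extract_scenes_py_spec : Claim_equal_extract_scenes_py := by
  intro script _
  unfold Spec_extract_scenes_py extract_scenes_py extract_scenes_py_alt
  have hA := pvFoldA_bridge (PySem.Chars.splitOn script.toList ['\n']) [] []
  simp only [List.nil_append] at hA
  generalize (PySem.Chars.splitOn script.toList ['\n']) = lines at *
  simp only []
  rw [hA, pvRunA_spec lines [], List.nil_append]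
  have hS := pvStarts_cast lines 0
  simp only [Nat.zero_add, Nat.cast_zero] at hS
  rw [hS]
  have hhd := pvStartsN_headD lines
  have hseg := pvSegs_spec lines
  have htake := pvTake_takeWhile (fun l => !pvIsHeader l) lines
  generalize htw : lines.takeWhile (fun l => !pvIsHeader l) = tw at *
  generalize hdw : lines.dropWhile (fun l => !pvIsHeader l) = dw at *
  generalize hSg : pvStartsN lines = S at *
  rw [List.map_append, List.map_append]
  congr 1
  · -- the pre-header chunk
    have hhead : ((List.map (fun k : Nat => (k : Int)) S ++ [(lines.length : Int)]).headD 0)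
        = ((S.headD lines.length : Nat) : Int) := by
      cases S <;> simp
    rw [hhead, hhd]
    cases tw with
    | nil => simp [pvFlat]
    | cons t ts =>
      rw [if_neg (by simp [pvFlat]), if_pos (by simp; omega)]
      simp only [List.map_cons, List.map_nil]
      rw [PySem.List.slice_zero_start, PySem.List.slice_to_natCast, htake]
      have h6 : pvFlat (t :: ts) = '\n' :: PySem.Chars.join ['\n'] (t :: ts) := by
        rw [pvJoin_eq_flat]; simp [pvFlat]
      rw [h6, pvStrip_cons_nl]
  · -- the header chunks
    have hzt : (List.map (fun k : Nat => (k : Int)) S).zip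
          ((List.map (fun k : Nat => (k : Int)) S ++ [(lines.length : Int)]).tail)
        = (S.zip (S.tail ++ [lines.length])).map
            (Prod.map (fun k : Nat => (k : Int)) (fun k : Nat => (k : Int))) := by
      cases S with
      | nil => simp
      | cons a t =>
        have h7 : (List.map (fun k : Nat => (k : Int)) (a :: t) ++ [(lines.length : Int)]).tail
            = List.map (fun k : Nat => (k : Int)) (t ++ [lines.length]) := by simp
        rw [h7, List.tail_cons, List.zip_map]
    rw [hzt, List.map_map, List.map_map, ← hseg, List.map_map]
    refine List.map_congr_left (fun ab _ => ?_)
    simp [Prod.map, pvStripJoin, PySem.List.slice_natCast]
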